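-- pv_equiv track=rewrite | github.com/saurav-codes/focus-timer-v | apps/realtime_timer/business_logic/techniques.py | generate_flowtime_cycles
-- ===== SOURCE A (Python) =====
-- def generate_flowtime_cycles(total_time):
--     cycles = []
--     remaining_time = total_time
--     focus_duration = 120  # Start with 2-hour focus periods
--     break_duration = 30  # 30-minute breaks
--
--     while remaining_time >= (focus_duration + break_duration):
--         cycles.extend([focus_duration, break_duration])
--         remaining_time -= focus_duration + break_duration
--
--     # If there's time left for at least a 25-minute focus period, add it
--     if remaining_time >= 25:
--         cycles.append(remaining_time)
--         remaining_time -= remaining_time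
--
--     return cycles, remaining_time
-- ===== SOURCE B (Python) =====
-- def generate_flowtime_cycles(total_time):
--     count = max(total_time // 150, 0)
--     cycles = [120, 30] * int(count)
--     remaining = total_time - 150 * count
--     if remaining >= 25:
--         cycles.append(remaining)
--         remaining -= remaining
--     return cycles, remaining
-- ===== Notes on version B (the rewrite author's own statement) =====
-- stated objective: simpler
-- what changed: Replaced the repeated-subtraction while-loop with a closed-form floor-division cycle count (clamped at zero) and list multiplication; the same final partial-focus tail rule is applied to the remainder.
import Mathlib
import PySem

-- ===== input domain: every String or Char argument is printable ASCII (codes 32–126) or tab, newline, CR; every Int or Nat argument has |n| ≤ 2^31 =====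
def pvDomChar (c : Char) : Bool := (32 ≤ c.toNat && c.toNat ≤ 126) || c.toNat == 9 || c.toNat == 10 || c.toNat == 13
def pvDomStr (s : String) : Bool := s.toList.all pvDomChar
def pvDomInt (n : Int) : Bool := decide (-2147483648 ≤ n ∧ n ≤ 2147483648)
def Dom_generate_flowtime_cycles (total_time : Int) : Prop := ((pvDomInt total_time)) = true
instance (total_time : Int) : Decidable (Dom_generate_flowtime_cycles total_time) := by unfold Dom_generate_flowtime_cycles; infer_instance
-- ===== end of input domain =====

-- B computes the full-cycle count by a single clamped floor division instead of A's repeated-subtraction while-loop; objective: simpler closed-form arithmetic.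


-- ===== PORT A =====
-- the while-loop: extend cycles with [120, 30] while remaining_time >= 150
def pvLoopA (cycles : List Int) (remaining_time : Int) : List Int × Int :=
  if remaining_time ≥ 120 + 30 then
    pvLoopA (cycles ++ [120, 30]) (remaining_time - (120 + 30))
  else (cycles, remaining_time)
termination_by remaining_time.toNat
decreasing_by omega

def generate_flowtime_cycles (total_time : Int) : List Int × Int :=
  let st := pvLoopA [] total_time
  let cycles := st.1
  let remaining_time := st.2
  if remaining_time ≥ 25 then (cycles ++ [remaining_time], remaining_time - remaining_time)
  else (cycles, remaining_time)

-- ===== PORT B =====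
def generate_flowtime_cycles_alt (total_time : Int) : List Int × Int :=
  let count := max (PySem.Int.floordiv total_time 150) 0
  let cycles := List.flatten (List.replicate count.toNat [120, 30])
  let remaining := total_time - 150 * count
  if remaining ≥ 25 then (cycles ++ [remaining], remaining - remaining)
  else (cycles, remaining)

-- ===== PRECONDITION & SPEC =====
def Spec_generate_flowtime_cycles (total_time : Int) (out : List Int × Int) : Prop := out = generate_flowtime_cycles_alt total_time
instance (total_time : Int) (out : List Int × Int) : Decidable (Spec_generate_flowtime_cycles total_time out) := by unfold Spec_generate_flowtime_cycles; infer_instance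

-- ===== CLAIM (what is proved, stated in full; the proofs are below) =====
def Claim_equal_generate_flowtime_cycles : Prop := ∀ (total_time : Int), Dom_generate_flowtime_cycles total_time → Spec_generate_flowtime_cycles total_time (generate_flowtime_cycles total_time)

-- ===== LEMMAS AND PROOFS =====
theorem pvLoopA_eq (r : Int) (cycles : List Int) :
    pvLoopA cycles r =
      (cycles ++ List.flatten (List.replicate (max (r / 150) 0).toNat [120, 30]),
       r - 150 * max (r / 150) 0) := by
  rw [pvLoopA]
  split
  · have ih := pvLoopA_eq (r - (120 + 30)) (cycles ++ [120, 30])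
    rw [ih]
    have hq : max (r / 150) 0 = max ((r - (120 + 30)) / 150) 0 + 1 := by omega
    have hn : (max (r / 150) 0).toNat = (max ((r - (120 + 30)) / 150) 0).toNat + 1 := by omega
    rw [hq]
    have hm : (max ((r - (120 + 30)) / 150) 0 + 1).toNat
        = (max ((r - (120 + 30)) / 150) 0).toNat + 1 := by omega
    rw [hm, List.replicate_succ]
    refine Prod.ext ?_ ?_
    · simp
    · simp only []
      omega
  · have hq : max (r / 150) 0 = 0 := by omega
    rw [hq]
    simp
termination_by r.toNat
decreasing_by omega

-- ===== VERDICT (by name: the statement is the Claim_ definition above) =====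
theorem generate_flowtime_cycles_spec : Claim_equal_generate_flowtime_cycles := by
  intro t _
  unfold Spec_generate_flowtime_cycles generate_flowtime_cycles generate_flowtime_cycles_alt
  rw [PySem.Int.floordiv_eq_ediv_of_pos (by omega : (0:Int) < 150)]
  rw [pvLoopA_eq]
  simp
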